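-- pv_equiv track=rewrite | github.com/manushakaru/testapi | stages/FactExtraction/fact_extraction.py | remove_facts_with_empty_vis
-- ===== SOURCE A (Python) =====
-- def remove_facts_with_empty_vis(data):
--     data["data_facts_with_vis_data"] = [
--         {**item, "facts": [fact for fact in item["facts"] if fact.get("vis_data")]}
--         for item in data.get("data_facts_with_vis_data", [])
--     ]
--
--     data["data_facts_with_vis_data"] = [
--         item for item in data["data_facts_with_vis_data"] if item["facts"]
--     ]
--
--     return data if data["data_facts_with_vis_data"] else None
-- ===== SOURCE B (Python) =====
-- def remove_facts_with_empty_vis(data):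
--     # In-place backward sweep: instead of rebuilding lists/dicts, walk the existing
--     # item list from the end, deleting falsy-vis facts (del facts[j]) and then the
--     # item itself when no fact survives.  Return value equals A's; side effects
--     # differ (A builds fresh dicts/lists, B mutates the originals in place).
--     items = data.get("data_facts_with_vis_data", [])
--     for i in range(len(items) - 1, -1, -1):
--         facts = items[i]["facts"]
--         for j in range(len(facts) - 1, -1, -1):
--             if not facts[j].get("vis_data"):
--                 del facts[j]
--         if not facts:
--             del items[i]
--     data["data_facts_with_vis_data"] = items
--     return data if items else None
-- ===== Notes on version B (the rewrite author's own statement) =====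
-- stated objective: alternative
-- what changed: Replaces A's two rebuild-the-list comprehensions (map every item to a fresh dict with filtered facts, then filter out empty ones) with an in-place backward index sweep that deletes falsy-vis facts with del facts[j] and then the emptied item with del items[i]; return value is identical, side effects differ (B mutates the original lists/dicts instead of allocating new ones). Pre_ excludes inputs where some item lacks the 'facts' key, on which both A and B raise KeyError.
import Mathlib
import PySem

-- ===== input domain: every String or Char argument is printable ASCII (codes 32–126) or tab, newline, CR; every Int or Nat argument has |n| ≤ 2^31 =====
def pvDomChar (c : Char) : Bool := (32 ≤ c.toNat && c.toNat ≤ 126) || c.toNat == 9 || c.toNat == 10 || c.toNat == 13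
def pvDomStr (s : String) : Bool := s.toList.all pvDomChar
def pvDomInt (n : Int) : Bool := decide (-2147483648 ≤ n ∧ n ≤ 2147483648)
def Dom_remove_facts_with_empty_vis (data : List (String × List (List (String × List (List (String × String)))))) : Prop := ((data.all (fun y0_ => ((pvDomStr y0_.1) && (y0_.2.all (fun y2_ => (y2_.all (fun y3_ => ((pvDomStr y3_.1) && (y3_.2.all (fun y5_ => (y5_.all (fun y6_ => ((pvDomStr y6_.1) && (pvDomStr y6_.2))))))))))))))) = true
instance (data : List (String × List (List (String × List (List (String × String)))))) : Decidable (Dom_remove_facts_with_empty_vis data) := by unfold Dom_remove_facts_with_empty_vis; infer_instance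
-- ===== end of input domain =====

-- B mutates its argument in place (A replaces the list with fresh dicts); the equivalence
-- claimed and proved here is about the RETURN value only.

-- type abbreviation (purely notational, used in instance binders)
abbrev pvData : Type := List (String × List (List (String × List (List (String × String)))))

-- ===== PORT A =====
-- Port of A: two comprehensions (map all items with filtered facts, then drop empty ones),
-- then reassign under the key and return.  Under Pre_ (every item has a "facts" key) the
-- item["facts"] lookup cannot raise, so it is ported as getD.
def pvTruthy? (o : Option String) : Bool :=
  match o with
  | some s => !(s == "")
  | none => false

def remove_facts_with_empty_vis (data : List (String × List (List (String × List (List (String × String)))))) : Option (List (String × List (List (String × List (List (String × String)))))) :=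
  let step1 := ((PySem.Dict.mk data).getD "data_facts_with_vis_data" []).map (fun item =>
      ((PySem.Dict.mk item).insert "facts"
        (((PySem.Dict.mk item).getD "facts" []).filter
          (fun fact => pvTruthy? ((PySem.Dict.mk fact).get? "vis_data")))).items)
  let step2 := step1.filter (fun item => !((PySem.Dict.mk item).getD "facts" [] == []))
  let d2 := (PySem.Dict.mk data).insert "data_facts_with_vis_data" step2
  -- 'return data if data["data_facts_with_vis_data"] else None': the key was just assigned, its value is step2
  if d2.getD "data_facts_with_vis_data" [] == [] then none else some d2.items

-- ===== PORT B =====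
-- Port of B: backward index sweep.  `pvSweep step n xs` models a Python loop
-- 'for i in range(n-1,-1,-1)' that at index i either deletes xs[i] (step = none,
-- Python's 'del xs[i]') or overwrites it in place (step = some y); indices below i
-- are untouched by the deletions already performed above, exactly as in Python.
def pvSweep {α : Type} (step : α → Option α) : Nat → List α → List α
  | 0, xs => xs
  | n+1, xs =>
      match xs[n]? with
      | some x =>
          pvSweep step n (match step x with
                          | some y => xs.set n y
                          | none => xs.eraseIdx n)
      | none => pvSweep step n xs

-- inner loop body: 'if not facts[j].get("vis_data"): del facts[j]'
def pvFactStep (fact : List (String × String)) : Option (List (String × String)) :=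
  if pvTruthy? ((PySem.Dict.mk fact).get? "vis_data") then some fact else none

-- outer loop body: filter the item's facts in place, then delete the item if none survive
def pvItemStep (item : List (String × List (List (String × String)))) :
    Option (List (String × List (List (String × String)))) :=
  let facts := (PySem.Dict.mk item).getD "facts" []
  let facts' := pvSweep pvFactStep facts.length facts
  if facts' == [] then none
  else some (((PySem.Dict.mk item).insert "facts" facts').items)

def remove_facts_with_empty_vis_alt (data : List (String × List (List (String × List (List (String × String)))))) : Option (List (String × List (List (String × List (List (String × String)))))) :=
  let items := (PySem.Dict.mk data).getD "data_facts_with_vis_data" []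
  let items' := pvSweep pvItemStep items.length items
  if items' == [] then none
  else some ((PySem.Dict.mk data).insert "data_facts_with_vis_data" items').items

-- ===== PRECONDITION & SPEC =====
-- Pre_ excludes exactly the inputs where some item lacks the "facts" key: there both
-- Python A and Python B raise KeyError (item["facts"]).
def Pre_remove_facts_with_empty_vis (data : List (String × List (List (String × List (List (String × String)))))) : Prop :=
  (((PySem.Dict.mk data).getD "data_facts_with_vis_data" []).all
    (fun item => (PySem.Dict.mk item).contains "facts")) = true
instance (data : pvData) : Decidable (Pre_remove_facts_with_empty_vis data) := by unfold Pre_remove_facts_with_empty_vis; infer_instance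

def pvWitness_remove_facts_with_empty_vis : (List (String × List (List (String × List (List (String × String)))))) :=
  [("data_facts_with_vis_data", [[("facts", [[("vis_data", "x")], []])]])]

def Spec_remove_facts_with_empty_vis (data : List (String × List (List (String × List (List (String × String)))))) (out : Option (List (String × List (List (String × List (List (String × String))))))) : Prop := out = remove_facts_with_empty_vis_alt data
def pvDecEqData : DecidableEq (List (String × List (List (String × List (List (String × String)))))) := by
  have d1 : DecidableEq (String × String) := instDecidableEqProd
  have d2 : DecidableEq (List (List (String × String))) := @instDecidableEqList _ (@instDecidableEqList _ d1)
  have d3 : DecidableEq (String × List (List (String × String))) := @instDecidableEqProd _ _ _ d2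
  have d4 : DecidableEq (List (List (String × List (List (String × String))))) := @instDecidableEqList _ (@instDecidableEqList _ d3)
  have d5 : DecidableEq (String × List (List (String × List (List (String × String))))) := @instDecidableEqProd _ _ _ d4
  exact @instDecidableEqList _ d5
instance (data : pvData) (out : Option pvData) : Decidable (Spec_remove_facts_with_empty_vis data out) := by
  unfold Spec_remove_facts_with_empty_vis
  exact @Option.instDecidableEq _ pvDecEqData out (remove_facts_with_empty_vis_alt data)

-- ===== CLAIM (what is proved, stated in full; the proofs are below) =====
def Claim_equal_remove_facts_with_empty_vis : Prop := ∀ (data : List (String × List (List (String × List (List (String × String)))))), Dom_remove_facts_with_empty_vis data → Pre_remove_facts_with_empty_vis data → Spec_remove_facts_with_empty_vis data (remove_facts_with_empty_vis data)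

-- ===== LEMMAS AND PROOFS =====

-- The backward in-place sweep computes filterMap of its step on the processed prefix.
theorem pvSweep_eq {α : Type} (step : α → Option α) :
    ∀ (n : Nat) (xs : List α), n ≤ xs.length →
      pvSweep step n xs = (xs.take n).filterMap step ++ xs.drop n := by
  intro n
  induction n with
  | zero => intro xs _; simp [pvSweep]
  | succ n ih =>
      intro xs h
      have hn : n < xs.length := Nat.lt_of_succ_le h
      have hx : xs[n]? = some xs[n] := List.getElem?_eq_getElem hn
      have htake : xs.take (n+1) = xs.take n ++ [xs[n]] := List.take_succ_eq_append_getElem hn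
      unfold pvSweep
      cases hstep : step xs[n] with
      | some y =>
          have hlen : n ≤ (xs.set n y).length := by simpa using Nat.le_of_lt hn
          simp only [hx, hstep, ih _ hlen]
          have h1 : (xs.set n y).take n = xs.take n := by
            rw [List.take_set]
            exact List.set_eq_of_length_le (by simp)
          have h2 : (xs.set n y).drop n = y :: xs.drop (n+1) := by
            rw [List.drop_set, if_neg (lt_irrefl n), Nat.sub_self,
              List.drop_eq_getElem_cons hn, List.set_cons_zero]
          rw [h1, h2, htake, List.filterMap_append]
          simp [hstep]
      | none =>
          have he : xs.eraseIdx n = xs.take n ++ xs.drop (n+1) :=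
            List.eraseIdx_eq_take_drop_succ xs n
          have hlen : n ≤ (xs.eraseIdx n).length := by
            rw [List.length_eraseIdx_of_lt hn]; omega
          have htl : (xs.take n).length = n := by simp [Nat.le_of_lt hn]
          simp only [hx, hstep]
          rw [ih _ hlen, he, List.take_left' htl, List.drop_left' htl, htake,
            List.filterMap_append]
          simp [hstep]

-- The inner sweep is the fact filter of A.
theorem sweep_facts_eq (facts : List (List (String × String))) :
    pvSweep pvFactStep facts.length facts =
      facts.filter (fun fact => pvTruthy? ((PySem.Dict.mk fact).get? "vis_data")) := by
  rw [pvSweep_eq _ _ _ (Nat.le_refl _), List.take_length, List.drop_length, List.append_nil]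
  induction facts with
  | nil => rfl
  | cons f fs ih =>
      rw [List.filterMap_cons, List.filter_cons,
        show pvFactStep f = (if pvTruthy? ((PySem.Dict.mk f).get? "vis_data") = true
          then some f else none) from rfl]
      split_ifs with h <;> simp [ih]

-- The outer sweep is A's map-then-filter.
theorem sweep_items_eq (items : List (List (String × List (List (String × String))))) :
    pvSweep pvItemStep items.length items =
      (items.map (fun item =>
        ((PySem.Dict.mk item).insert "facts"
          (((PySem.Dict.mk item).getD "facts" []).filter
            (fun fact => pvTruthy? ((PySem.Dict.mk fact).get? "vis_data")))).items)).filter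
        (fun item => !((PySem.Dict.mk item).getD "facts" [] == [])) := by
  rw [pvSweep_eq _ _ _ (Nat.le_refl _)]
  rw [List.take_length, List.drop_length, List.append_nil]
  induction items with
  | nil => rfl
  | cons item rest ih =>
      have hmk : ∀ (d : PySem.Dict String (List (List (String × String)))), PySem.Dict.mk d.items = d := fun d => rfl
      have hstep : pvItemStep item =
          (if (((PySem.Dict.mk item).getD "facts" []).filter
                (fun fact => pvTruthy? ((PySem.Dict.mk fact).get? "vis_data"))) = []
           then none
           else some (((PySem.Dict.mk item).insert "facts"
             (((PySem.Dict.mk item).getD "facts" []).filter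
               (fun fact => pvTruthy? ((PySem.Dict.mk fact).get? "vis_data")))).items)) := by
        simp [pvItemStep, sweep_facts_eq]
      rw [List.filterMap_cons, hstep]
      by_cases h : (((PySem.Dict.mk item).getD "facts" []).filter
          (fun fact => pvTruthy? ((PySem.Dict.mk fact).get? "vis_data"))) = []
      · simp [h, hmk, ih, PySem.Dict.getD_insert_self]
      · simp [h, hmk, ih, PySem.Dict.getD_insert_self]

-- ===== VERDICT (by name: the statement is the Claim_ definition above) =====
theorem remove_facts_with_empty_vis_spec : Claim_equal_remove_facts_with_empty_vis := by
  intro data _ _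
  unfold Spec_remove_facts_with_empty_vis remove_facts_with_empty_vis remove_facts_with_empty_vis_alt
  simp only [sweep_items_eq, PySem.Dict.getD_insert_self]
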